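-- pv_equiv track=rewrite | github.com/Jacobngai/ing-heng-credit-seo | clients/ing-heng/website/fix_specific_frontmatter.py | extract_and_clean_frontmatter
-- ===== SOURCE A (Python) =====
-- from typing import List, Dict, Tuple, Optional
--
-- def extract_and_clean_frontmatter(content: str) -> Tuple[Optional[str], Optional[str], bool]:
--     """
--     Extract and clean frontmatter from markdown content.
--     Returns: (clean_frontmatter, body_content, success)
--     """
--     if not content.strip() or not content.strip().startswith('---'):
--         return None, content, False
--
--     lines = content.split('\n')
--     frontmatter_lines = []
--     body_lines = []
--     in_frontmatter = False
--     frontmatter_closed = False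
--
--     for i, line in enumerate(lines):
--         if i == 0 and line.strip() == '---':
--             in_frontmatter = True
--             continue
--         elif in_frontmatter and line.strip() == '---':
--             in_frontmatter = False
--             frontmatter_closed = True
--             body_lines = lines[i+1:]
--             break
--         elif in_frontmatter:
--             frontmatter_lines.append(line)
--
--     if not frontmatter_closed:
--         return None, content, False
--
--     # Clean the frontmatter lines
--     cleaned_frontmatter_lines = []
--     for line in frontmatter_lines:
--         # Remove standalone ... lines
--         if line.strip() == '...':
--             continue
--         cleaned_frontmatter_lines.append(line)
--
--     frontmatter_text = '\n'.join(cleaned_frontmatter_lines)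
--     body_content = '\n'.join(body_lines)
--
--     return frontmatter_text, body_content, True
-- ===== SOURCE B (Python) =====
-- def extract_and_clean_frontmatter(content):
--     """
--     Extract and clean frontmatter from markdown content.
--     Returns: (clean_frontmatter, body_content, success)
--     """
--     if not content.strip() or not content.strip().startswith('---'):
--         return None, content, False
--     first, sep, remaining = content.partition('\n')
--     if first.strip() != '---' or not sep:
--         return None, content, False
--     fm_parts = []
--     while True:
--         line, sep, after = remaining.partition('\n')
--         if line.strip() == '---':
--             # body is the untouched tail of content ('' when the closing line is last)
--             return '\n'.join(fm_parts), after, True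
--         if line.strip() != '...':
--             fm_parts.append(line)
--         if not sep:
--             return None, content, False
--         remaining = after
-- ===== Notes on version B (the rewrite author's own statement) =====
-- stated objective: alternative
-- what changed: Replaces A's pipeline (split whole content into a line list, stateful flag loop with break, second filtering loop, re-join body and frontmatter) by a zero-copy partition walker: str.partition peels one line at a time, ellipsis-only lines are filtered during that single scan, and the body is returned as the untouched tail string instead of being re-joined from a list.
import Mathlib
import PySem

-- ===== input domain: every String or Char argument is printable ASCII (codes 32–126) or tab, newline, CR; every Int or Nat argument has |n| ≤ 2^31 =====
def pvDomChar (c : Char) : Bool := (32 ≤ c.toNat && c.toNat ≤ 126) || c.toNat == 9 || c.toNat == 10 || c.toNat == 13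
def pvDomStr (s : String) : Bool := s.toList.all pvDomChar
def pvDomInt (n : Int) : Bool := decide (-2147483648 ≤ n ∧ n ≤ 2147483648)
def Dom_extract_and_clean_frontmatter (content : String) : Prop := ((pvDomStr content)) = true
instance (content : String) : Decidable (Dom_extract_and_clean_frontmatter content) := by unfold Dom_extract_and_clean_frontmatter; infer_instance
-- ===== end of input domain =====

-- B replaces A's split-into-lines / flag-loop / filter-loop / re-join pipeline by a partition
-- walker: it never splits the whole content into a line list, filters '...' lines during the one
-- scan, and returns the body as the untouched tail of the input; objective: alternative.

-- ===== PORT A =====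
-- A's enumerate loop with state (frontmatter_lines, in_frontmatter) and break; returns
-- (frontmatter_lines, body_lines (= lines[i+1:] at the break), frontmatter_closed).
def pvALoop (i : Nat) (inFm : Bool) (fmAcc : List String) :
    List String → List String × List String × Bool
  | [] => (fmAcc, [], false)
  | l :: rest =>
    if i == 0 && PySem.Str.strip l = "---" then
      pvALoop (i + 1) true fmAcc rest
    else if inFm && PySem.Str.strip l = "---" then
      (fmAcc, rest, true)
    else if inFm then
      pvALoop (i + 1) inFm (fmAcc ++ [l]) rest
    else
      pvALoop (i + 1) inFm fmAcc rest

def extract_and_clean_frontmatter (content : String) : Option String × Option String × Bool :=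
  if PySem.Str.strip content = "" || !PySem.Str.startswith (PySem.Str.strip content) "---" then
    (none, some content, false)
  else
    let lines := (PySem.Str.split? content "\n").getD []
    let res := pvALoop 0 false [] lines
    if !res.2.2 then
      (none, some content, false)
    else
      let cleaned := res.1.foldl (fun acc l => if PySem.Str.strip l = "..." then acc else acc ++ [l]) []
      (some (PySem.Str.join "\n" cleaned), some (PySem.Str.join "\n" res.2.1), true)

-- ===== PORT B =====
-- s.partition('\n') — hand port, exact for this single-character separator: the part before the
-- first '\n', plus (some tail) when '\n' occurs (Python's 'sep' truthy), none when it does not.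
def pvPartNl : List Char → List Char × Option (List Char)
  | [] => ([], none)
  | c :: rest =>
    if c = '\n' then ([], some rest)
    else
      let p := pvPartNl rest
      (c :: p.1, p.2)

-- termination measure of B's while loop: the tail of a successful partition is shorter
theorem pvPartNl_some_lt {s line after : List Char} (h : pvPartNl s = (line, some after)) :
    after.length < s.length := by
  induction s generalizing line with
  | nil => simp [pvPartNl] at h
  | cons c rest ih =>
    by_cases hc : c = '\n'
    · simp [pvPartNl, hc] at h
      simp [← h.2, List.length_cons]
    · simp [pvPartNl, hc] at h
      have := ih (line := (pvPartNl rest).1) (by rw [← h.2])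
      simp [List.length_cons]; omega

-- B's while loop: partition off one line; on the closing '---' return the collected parts and
-- the untouched tail; otherwise collect the line unless it strips to '...', fail at end of input.
def pvBLoop (fmParts : List String) (remaining : List Char) :
    Option (List String × List Char) :=
  match h : pvPartNl remaining with
  | (line, none) =>
    if PySem.Chars.strip line = "---".toList then some (fmParts, []) else none
  | (line, some after) =>
    if PySem.Chars.strip line = "---".toList then some (fmParts, after)
    else
      pvBLoop (if PySem.Chars.strip line = "...".toList then fmParts
               else fmParts ++ [String.ofList line]) after
termination_by remaining.length
decreasing_by exact pvPartNl_some_lt h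

def extract_and_clean_frontmatter_alt (content : String) : Option String × Option String × Bool :=
  if PySem.Str.strip content = "" || !PySem.Str.startswith (PySem.Str.strip content) "---" then
    (none, some content, false)
  else
    match pvPartNl content.toList with
    | (_, none) => (none, some content, false)
    | (first, some remaining) =>
      if PySem.Chars.strip first ≠ "---".toList then (none, some content, false)
      else
        match pvBLoop [] remaining with
        | none => (none, some content, false)
        | some (fm, body) =>
          (some (PySem.Str.join "\n" fm), some (String.ofList body), true)

-- ===== PRECONDITION & SPEC =====
def Spec_extract_and_clean_frontmatter (content : String) (out : Option String × Option String × Bool) : Prop := out = extract_and_clean_frontmatter_alt content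
instance (content : String) (out : Option String × Option String × Bool) : Decidable (Spec_extract_and_clean_frontmatter content out) := by unfold Spec_extract_and_clean_frontmatter; infer_instance

-- ===== CLAIM (what is proved, stated in full; the proofs are below) =====
def Claim_equal_extract_and_clean_frontmatter : Prop := ∀ (content : String), Dom_extract_and_clean_frontmatter content → Spec_extract_and_clean_frontmatter content (extract_and_clean_frontmatter content)

-- ===== LEMMAS AND PROOFS =====

def pvLines (s : List Char) : List (List Char) :=
  match h : pvPartNl s with
  | (a, none) => [a]
  | (a, some r) => a :: pvLines r
termination_by s.length
decreasing_by exact pvPartNl_some_lt h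

def pvConsHead (x : List Char) : List (List Char) → List (List Char)
  | [] => [x]
  | h :: t => (x ++ h) :: t

lemma pvLines_nil : pvLines [] = [[]] := by rw [pvLines]; simp [pvPartNl]
lemma pvLines_cons_nl (rest : List Char) : pvLines ('\n' :: rest) = [] :: pvLines rest := by
  rw [pvLines]; simp [pvPartNl]
lemma pvLines_ne_nil (s : List Char) : pvLines s ≠ [] := by
  rw [pvLines]
  rcases h : pvPartNl s with ⟨a, _ | r⟩ <;> simp

lemma pvLines_cons (c : Char) (rest : List Char) (hc : c ≠ '\n') :
    pvLines (c :: rest) = pvConsHead [c] (pvLines rest) := by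
  rw [pvLines, pvLines]
  rcases h : pvPartNl rest with ⟨a, r?⟩
  have : pvPartNl (c :: rest) = (c :: a, r?) := by simp [pvPartNl, hc, h]
  rw [this]
  cases r? <;> simp [pvConsHead]

lemma pvConsHead_assoc (x y : List Char) (ls : List (List Char)) :
    pvConsHead x (pvConsHead y ls) = pvConsHead (x ++ y) ls := by
  cases ls <;> simp [pvConsHead]


lemma pvSplitGo_spec : ∀ (fuel : Nat) (l cur : List Char) (acc : List (List Char)),
    l.length ≤ fuel →
    PySem.Chars.splitOn.go ['\n'] fuel l cur acc = acc.reverse ++ pvConsHead cur.reverse (pvLines l) := by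
  intro fuel
  induction fuel with
  | zero =>
    intro l cur acc hl
    have : l = [] := List.length_eq_zero_iff.mp (Nat.le_zero.mp hl)
    subst this
    rw [PySem.Chars.splitOn.go]
    simp [pvLines_nil, pvConsHead]
  | succ f ih =>
    intro l cur acc hl
    cases l with
    | nil =>
      rw [PySem.Chars.splitOn.go]
      · simp [pvLines_nil, pvConsHead]
      · simp
    | cons c rest =>
      rw [PySem.Chars.splitOn.go]
      by_cases hc : c = '\n'
      · subst hc
        have hle : rest.length ≤ f := by simpa using hl
        simp only [List.isPrefixOf, BEq.rfl, Bool.true_and]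
        rw [if_pos (by simp), show List.drop ['\n'].length ('\n' :: rest) = rest from rfl,
          ih _ _ _ hle, pvLines_cons_nl]
        rcases hL : pvLines rest with _ | ⟨h0, t⟩
        · exact absurd hL (pvLines_ne_nil rest)
        · simp [pvConsHead]
      · have hle : rest.length ≤ f := by simpa using hl
        have hpre : List.isPrefixOf ['\n'] (c :: rest) = false := by
          simp [List.isPrefixOf]; exact fun h => absurd h.symm hc
        rw [if_neg (by simp [hpre]), ih _ _ _ hle, pvLines_cons c rest hc]
        simp [pvConsHead_assoc]

lemma pvSplitOn_eq_pvLines (s : List Char) : PySem.Chars.splitOn s ['\n'] = pvLines s := by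
  have := pvSplitGo_spec (s.length + 1) s [] [] (by omega)
  rw [PySem.Chars.splitOn] at *
  rw [this]
  rcases hL : pvLines s with _ | ⟨h0, t⟩
  · exact absurd hL (pvLines_ne_nil s)
  · simp [pvConsHead]

lemma pvPartNl_none_eq {s a : List Char} (h : pvPartNl s = (a, none)) : s = a := by
  induction s generalizing a with
  | nil => simp [pvPartNl] at h; simp [h]
  | cons c rest ih =>
    by_cases hc : c = '\n'
    · simp [pvPartNl, hc] at h
    · simp [pvPartNl, hc] at h
      have h2 : pvPartNl rest = ((pvPartNl rest).1, none) := by rw [← h.2]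
      rw [← h.1, ← ih h2]

lemma pvPartNl_some_eq {s a r : List Char} (h : pvPartNl s = (a, some r)) : s = a ++ '\n' :: r := by
  induction s generalizing a r with
  | nil => simp [pvPartNl] at h
  | cons c rest ih =>
    by_cases hc : c = '\n'
    · simp [pvPartNl, hc] at h
      simp [hc, ← h.1, ← h.2]
    · simp [pvPartNl, hc] at h
      have := ih (a := (pvPartNl rest).1) (r := r) (by rw [← h.2])
      rw [← h.1, List.cons_append, ← this]

lemma pvJoin_pvLines (s : List Char) : PySem.Chars.join ['\n'] (pvLines s) = s := by
  induction s using pvLines.induct with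
  | case1 s a h =>
    rw [pvLines, h]
    simp [PySem.Chars.join, List.intercalate, pvPartNl_none_eq h]
  | case2 s a r h ih =>
    rw [pvLines, h]
    dsimp only
    rcases hL : pvLines r with _ | ⟨h0, t⟩
    · exact absurd hL (pvLines_ne_nil r)
    · rw [PySem.Chars.join] at *
      rw [show List.intercalate ['\n'] (a :: h0 :: t) = a ++ '\n' :: List.intercalate ['\n'] (h0 :: t) from by simp [List.intercalate]]
      rw [← hL] at *
      rw [ih, ← pvPartNl_some_eq h]

def pvFind (j : Nat) : List String → Option Nat
  | [] => none
  | l :: rest => if PySem.Str.strip l = "---" then some j else pvFind (j + 1) rest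

lemma pvFind_shift (ls : List String) : ∀ i : Nat, pvFind i ls = (pvFind 0 ls).map (· + i) := by
  induction ls with
  | nil => intro i; simp [pvFind]
  | cons l rest ih =>
    intro i
    simp only [pvFind]
    by_cases h : PySem.Str.strip l = "---"
    · simp [h]
    · rw [if_neg h, if_neg h, ih (i + 1), ih 1, Option.map_map]
      cases pvFind 0 rest
      · simp
      · simp; omega

lemma pvStrip_ofList (a : List Char) (t : String) :
    (PySem.Str.strip (String.ofList a) = t) ↔ PySem.Chars.strip a = t.toList := by
  constructor
  · intro h
    have := congrArg String.toList h
    simpa using this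
  · intro h
    have h2 : (PySem.Str.strip (String.ofList a)).toList = t.toList := by simpa using h
    calc PySem.Str.strip (String.ofList a)
        = String.ofList ((PySem.Str.strip (String.ofList a)).toList) := by rw [String.ofList_toList]
      _ = String.ofList t.toList := by rw [h2]
      _ = t := by rw [String.ofList_toList]

lemma pvStrJoin_ofList (ls : List (List Char)) :
    PySem.Str.join "\n" (ls.map String.ofList) = String.ofList (PySem.Chars.join ['\n'] ls) := by
  have h1 : (PySem.Str.join "\n" (ls.map String.ofList)).toList = PySem.Chars.join ['\n'] ls := by
    rw [PySem.Str.toList_join]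
    congr 1
    simp [List.map_map, Function.comp_def]
  calc PySem.Str.join "\n" (ls.map String.ofList)
      = String.ofList ((PySem.Str.join "\n" (ls.map String.ofList)).toList) := by
        rw [String.ofList_toList]
    _ = String.ofList (PySem.Chars.join ['\n'] ls) := by rw [h1]

lemma pvLines_eq {s line : List Char} {r? : Option (List Char)}
    (hp : pvPartNl s = (line, r?)) :
    pvLines s = match r? with
      | none => [line]
      | some r => line :: pvLines r := by
  rw [pvLines]
  split
  · next a h => rw [hp] at h; injection h with h1 h2; subst h1; cases r? with
      | none => rfl
      | some r => simp_all
  · next a r h => rw [hp] at h; injection h with h1 h2; subst h1; cases r? with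
      | none => simp_all
      | some r' => injection h2 with h3; subst h3; rfl

lemma pvBLoop_eq (fm : List String) {s line : List Char} {r? : Option (List Char)}
    (hp : pvPartNl s = (line, r?)) :
    pvBLoop fm s = match r? with
      | none => if PySem.Chars.strip line = "---".toList then some (fm, []) else none
      | some after =>
        if PySem.Chars.strip line = "---".toList then some (fm, after)
        else pvBLoop (if PySem.Chars.strip line = "...".toList then fm
                      else fm ++ [String.ofList line]) after := by
  rw [pvBLoop]
  split
  · next a h => rw [hp] at h; injection h with h1 h2; subst h1; cases r? with
      | none => rfl
      | some r => simp_all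
  · next a r h => rw [hp] at h; injection h with h1 h2; subst h1; cases r? with
      | none => simp_all
      | some r' => injection h2 with h3; subst h3; rfl

lemma pvBLoop_spec (s : List Char) : ∀ fm : List String,
    pvBLoop fm s =
      match pvFind 0 ((pvLines s).map String.ofList) with
      | none => none
      | some j => some
          (fm ++ (((pvLines s).map String.ofList).take j).filter (fun l => PySem.Str.strip l ≠ "..."),
           PySem.Chars.join ['\n'] ((pvLines s).drop (j + 1))) := by
  have main : ∀ (n : Nat) (s : List Char), s.length ≤ n → ∀ fm : List String,
      pvBLoop fm s =
        match pvFind 0 ((pvLines s).map String.ofList) with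
        | none => none
        | some j => some
            (fm ++ (((pvLines s).map String.ofList).take j).filter (fun l => PySem.Str.strip l ≠ "..."),
             PySem.Chars.join ['\n'] ((pvLines s).drop (j + 1))) := by
    intro n
    induction n with
    | zero =>
      intro s hs fm
      have h0 : s = [] := List.length_eq_zero_iff.mp (Nat.le_zero.mp hs)
      subst h0
      rw [pvBLoop_eq fm (show pvPartNl [] = ([], none) from rfl),
        pvLines_eq (show pvPartNl [] = ([], none) from rfl)]
      dsimp only
      simp only [List.map_cons, List.map_nil, pvFind]
      rw [if_neg (by decide), if_neg (by rw [pvStrip_ofList]; decide)]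
    | succ m ih =>
      intro s hs fm
      rcases hp : pvPartNl s with ⟨line, r?⟩
      rw [pvBLoop_eq fm hp, pvLines_eq hp]
      cases r? with
      | none =>
        dsimp only
        by_cases hcl : PySem.Chars.strip line = "---".toList
        · rw [if_pos hcl]
          simp only [List.map_cons, List.map_nil, pvFind]
          rw [if_pos (by rw [pvStrip_ofList]; exact hcl)]
          simp [PySem.Chars.join, List.intercalate]
        · rw [if_neg hcl]
          simp only [List.map_cons, List.map_nil, pvFind]
          rw [if_neg (by rw [pvStrip_ofList]; exact hcl)]
      | some after =>
        dsimp only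
        have hlen : after.length ≤ m := by
          have := pvPartNl_some_lt hp
          omega
        by_cases hcl : PySem.Chars.strip line = "---".toList
        · rw [if_pos hcl]
          simp only [List.map_cons, pvFind]
          rw [if_pos (by rw [pvStrip_ofList]; exact hcl)]
          simp [pvJoin_pvLines]
        · rw [if_neg hcl]
          by_cases hdots : PySem.Chars.strip line = "...".toList
          · rw [if_pos hdots, ih after hlen]
            simp only [List.map_cons, pvFind]
            rw [if_neg (by rw [pvStrip_ofList]; exact hcl), pvFind_shift _ 1]
            cases hf : pvFind 0 ((pvLines after).map String.ofList) with
            | none => simp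
            | some j =>
              simp only [Option.map_some]
              rw [List.take_succ_cons, List.drop_succ_cons]
              congr 2
              rw [List.filter_cons_of_neg (by simp [pvStrip_ofList, hdots])]
          · rw [if_neg hdots, ih after hlen]
            simp only [List.map_cons, pvFind]
            rw [if_neg (by rw [pvStrip_ofList]; exact hcl), pvFind_shift _ 1]
            cases hf : pvFind 0 ((pvLines after).map String.ofList) with
            | none => simp
            | some j =>
              simp only [Option.map_some]
              rw [List.take_succ_cons, List.drop_succ_cons]
              congr 1
              rw [List.filter_cons_of_pos (by simp [pvStrip_ofList]; exact hdots)]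
              simp
  exact main s.length s le_rfl

lemma pvALoop_false (rest : List String) : ∀ i acc, i ≠ 0 →
    pvALoop i false acc rest = (acc, [], false) := by
  induction rest with
  | nil => intro i acc _; rfl
  | cons l rs ih =>
    intro i acc hi
    have h1 : (i == 0) = false := by simp [hi]
    simp only [pvALoop, h1, Bool.false_and, Bool.false_eq_true, if_false]
    exact ih (i + 1) acc (Nat.succ_ne_zero i)

lemma pvALoop_true (rest : List String) : ∀ i acc, i ≠ 0 →
    pvALoop i true acc rest =
      match pvFind 0 rest with
      | none => (acc ++ rest, [], false)
      | some j => (acc ++ rest.take j, rest.drop (j + 1), true) := by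
  induction rest with
  | nil => intro i acc _; simp [pvALoop, pvFind]
  | cons l rs ih =>
    intro i acc hi
    have h1 : (i == 0) = false := by simp [hi]
    simp only [pvALoop, pvFind, h1, Bool.false_and, Bool.false_eq_true, if_false, Bool.true_and]
    by_cases h : PySem.Str.strip l = "---"
    · simp [h]
    · rw [if_neg (by simp [h]), if_neg h, ih (i + 1) (acc ++ [l]) (Nat.succ_ne_zero i),
        pvFind_shift rs 1]
      cases pvFind 0 rs with
      | none => simp
      | some j => simp [List.take_succ_cons, List.drop_succ_cons]

lemma pvClean_eq_filter (ls : List String) :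
    ls.foldl (fun acc l => if PySem.Str.strip l = "..." then acc else acc ++ [l]) [] =
      ls.filter (fun l => PySem.Str.strip l ≠ "...") := by
  have := PySem.List.foldl_append_ite_eq_filter
    (p := fun l => PySem.Str.strip l ≠ "...") (l := ls) (acc := ([] : List String))
  simp only [ne_eq, ite_not] at this
  simpa using this

lemma pvSplit_lines (content : String) :
    (PySem.Str.split? content "\n").getD [] = (pvLines content.toList).map String.ofList := by
  rw [PySem.Str.split?]
  have : PySem.Chars.split? content.toList "\n".toList = some (pvLines content.toList) := by
    rw [PySem.Chars.split?]
    rw [if_neg (by decide)]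
    rw [show ("\n".toList) = ['\n'] from rfl, pvSplitOn_eq_pvLines]
  rw [this]
  rfl

-- ===== VERDICT (by name: the statement is the Claim_ definition above) =====
theorem extract_and_clean_frontmatter_spec : Claim_equal_extract_and_clean_frontmatter := by
  intro content _
  unfold Spec_extract_and_clean_frontmatter
  unfold extract_and_clean_frontmatter extract_and_clean_frontmatter_alt
  by_cases hg : (PySem.Str.strip content = "" || !PySem.Str.startswith (PySem.Str.strip content) "---") = true
  · rw [if_pos hg, if_pos hg]
  · rw [if_neg hg, if_neg hg]
    rcases hp : pvPartNl content.toList with ⟨a, r?⟩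
    have hlines := pvSplit_lines content
    rw [pvLines_eq hp] at hlines
    cases r? with
    | none =>
      dsimp only at hlines ⊢
      rw [hlines]
      have hres : pvALoop 0 false [] [String.ofList a] = ([], [], false) := by
        by_cases h0 : PySem.Str.strip (String.ofList a) = "---" <;>
          simp [pvALoop, h0]
      simp [hres]
    | some rem =>
      dsimp only at hlines ⊢
      rw [hlines]
      by_cases h0 : PySem.Chars.strip a = "---".toList
      · have h0' : PySem.Str.strip (String.ofList a) = "---" := (pvStrip_ofList a "---").mpr h0
        simp only [List.map_cons]
        have hstep : pvALoop 0 false [] (String.ofList a :: (pvLines rem).map String.ofList) =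
            pvALoop 1 true [] ((pvLines rem).map String.ofList) := by
          simp [pvALoop, h0']
        have hres := hstep.trans (pvALoop_true _ 1 [] (Nat.succ_ne_zero 0))
        cases hf : pvFind 0 ((pvLines rem).map String.ofList) with
        | none =>
          rw [hf] at hres
          dsimp only at hres
          simp [hres, pvBLoop_spec rem [], hf, h0]
        | some j =>
          rw [hf] at hres
          dsimp only at hres
          simp only [hres, List.nil_append, Bool.not_true, Bool.false_eq_true, if_false,
            pvBLoop_spec rem [], hf]
          rw [pvClean_eq_filter]
          simp only [← List.map_drop, pvStrJoin_ofList]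
          simp [h0]
      · have h0' : ¬ PySem.Str.strip (String.ofList a) = "---" :=
          fun h => h0 ((pvStrip_ofList a "---").mp h)
        simp only [List.map_cons]
        have hstep : pvALoop 0 false [] (String.ofList a :: (pvLines rem).map String.ofList) =
            pvALoop 1 false [] ((pvLines rem).map String.ofList) := by
          simp [pvALoop, h0']
        have hres := hstep.trans (pvALoop_false _ 1 [] (Nat.succ_ne_zero 0))
        simp only [hres]
        simp only [Bool.not_false, if_true]
        rw [if_pos (show PySem.Chars.strip a ≠ "---".toList from h0)]
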